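-- pv_equiv track=rewrite | github.com/Lintik/hackerrank | CORE CS/Algorithms/Implementation/Breaking the Records/code.py | getRecord
-- ===== SOURCE A (Python) =====
-- def getRecord(s):
--     # Complete this function
--     maxc = minc = 0
--     m = n = s[0]
--
--     for i in range(1,len(s)):
--         if m<s[i]:
--             m=s[i]
--             maxc+=1
--         elif n>s[i]:
--             n=s[i]
--             minc+=1
--
--     return [maxc,minc]
-- ===== SOURCE B (Python) =====
-- def getRecord(s):
--     # Build the running-max and running-min tables, then count strict
--     # rises / falls between adjacent entries of each table.
--     runmax = []
--     runmin = []
--     cm = cn = None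
--     for x in s:
--         cm = x if cm is None or x > cm else cm
--         cn = x if cn is None or x < cn else cn
--         runmax.append(cm)
--         runmin.append(cn)
--     maxc = sum(1 for a, b in zip(runmax, runmax[1:]) if b > a)
--     minc = sum(1 for a, b in zip(runmin, runmin[1:]) if b < a)
--     return [maxc, minc]
-- ===== Notes on version B (the rewrite author's own statement) =====
-- stated objective: alternative
-- what changed: B builds running-max/min tables in one pass and then counts strict adjacent rises/falls over zipped tables, instead of A's single fused branching scan over indices.
import Mathlib
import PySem

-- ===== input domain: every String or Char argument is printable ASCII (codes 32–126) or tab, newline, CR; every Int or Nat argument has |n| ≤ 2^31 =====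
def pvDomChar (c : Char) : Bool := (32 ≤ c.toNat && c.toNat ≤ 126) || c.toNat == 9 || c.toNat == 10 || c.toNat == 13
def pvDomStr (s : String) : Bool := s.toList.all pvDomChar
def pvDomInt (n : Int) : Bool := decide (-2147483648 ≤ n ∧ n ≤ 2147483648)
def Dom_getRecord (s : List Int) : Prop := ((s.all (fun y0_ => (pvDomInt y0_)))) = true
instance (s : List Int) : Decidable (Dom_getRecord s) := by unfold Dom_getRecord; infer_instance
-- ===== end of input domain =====

-- B replaces A's single fused branching scan by a running-max/min table build
-- followed by counting strict adjacent rises/falls (objective: alternative);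
-- Pre_ excludes only the empty list, on which A raises IndexError.

-- ===== PORT A =====
-- loop body of A; state = (maxc, minc, m, n)
def pvStepA (st : Int × Int × Int × Int) (v : Int) : Int × Int × Int × Int :=
  if st.2.2.1 < v then (st.1 + 1, st.2.1, v, st.2.2.2)
  else if st.2.2.2 > v then (st.1, st.2.1 + 1, st.2.2.1, v)
  else st

def getRecord (s : List Int) : List Int :=
  match s with
  | [] => []   -- A raises IndexError at s[0]; excluded by Pre_getRecord
  | s0 :: _ =>
    -- for i in range(1, len(s)): s[i] is in range, so pyGetD is exact here
    let r := (PySem.List.pyRange 1 (s.length : Int) 1).foldl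
      (fun st i => pvStepA st (PySem.List.pyGetD s i 0)) (0, 0, s0, s0)
    [r.1, r.2.1]

-- ===== PORT B =====
-- loop body of B; state = (runmax, runmin, cm, cn)
def pvStepB (st : List Int × List Int × Option Int × Option Int) (x : Int) :
    List Int × List Int × Option Int × Option Int :=
  let cm' := match st.2.2.1 with | none => x | some m => if x > m then x else m
  let cn' := match st.2.2.2 with | none => x | some n => if x < n then x else n
  (st.1 ++ [cm'], st.2.1 ++ [cn'], some cm', some cn')

def getRecord_alt (s : List Int) : List Int :=
  let st := s.foldl pvStepB ([], [], none, none)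
  let runmax := st.1
  let runmin := st.2.1
  let maxc := ((runmax.zip (PySem.List.slice runmax (some 1) none)).map
      (fun p => if p.2 > p.1 then (1 : Int) else 0)).sum
  let minc := ((runmin.zip (PySem.List.slice runmin (some 1) none)).map
      (fun p => if p.2 < p.1 then (1 : Int) else 0)).sum
  [maxc, minc]

-- ===== PRECONDITION & SPEC =====
-- Pre_ excludes only the empty list, on which A raises IndexError (s[0]).
def Pre_getRecord (s : List Int) : Prop := s ≠ []
instance (s : List Int) : Decidable (Pre_getRecord s) := by unfold Pre_getRecord; infer_instance
def pvWitness_getRecord : List Int := [3, 1, 4, 1, 5]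

def Spec_getRecord (s : List Int) (out : List Int) : Prop := out = getRecord_alt s
instance (s : List Int) (out : List Int) : Decidable (Spec_getRecord s out) := by unfold Spec_getRecord; infer_instance

-- ===== CLAIM (what is proved, stated in full; the proofs are below) =====
def Claim_equal_getRecord : Prop := ∀ (s : List Int), Dom_getRecord s → Pre_getRecord s → Spec_getRecord s (getRecord s)

-- ===== LEMMAS AND PROOFS =====

-- record-break counters as structural recursions on the tail
def pvRise (m : Int) : List Int → Int
  | [] => 0
  | v :: t => if m < v then 1 + pvRise v t else pvRise m t

def pvFall (n : Int) : List Int → Int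
  | [] => 0
  | v :: t => if n > v then 1 + pvFall v t else pvFall n t

-- running-max / running-min tables (without the leading element)
def pvScanMax (m : Int) : List Int → List Int
  | [] => []
  | v :: t => (if v > m then v else m) :: pvScanMax (if v > m then v else m) t

def pvScanMin (n : Int) : List Int → List Int
  | [] => []
  | v :: t => (if v < n then v else n) :: pvScanMin (if v < n then v else n) t

-- final accumulator values of B's scan
def pvMaxAcc (m : Int) : List Int → Int
  | [] => m
  | v :: t => pvMaxAcc (if v > m then v else m) t

def pvMinAcc (n : Int) : List Int → Int
  | [] => n
  | v :: t => pvMinAcc (if v < n then v else n) t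

theorem pvFoldA_eq (t : List Int) : ∀ (maxc minc m n : Int), n ≤ m →
    (t.foldl pvStepA (maxc, minc, m, n)).1 = maxc + pvRise m t ∧
    (t.foldl pvStepA (maxc, minc, m, n)).2.1 = minc + pvFall n t := by
  induction t with
  | nil => intro maxc minc m n _; simp [pvRise, pvFall]
  | cons v t ih =>
    intro maxc minc m n hnm
    simp only [List.foldl_cons, pvStepA, pvRise, pvFall]
    by_cases h1 : m < v
    · have hnv : ¬ n > v := by omega
      simp only [if_pos h1, if_neg hnv]
      obtain ⟨h1', h2'⟩ := ih (maxc + 1) minc v n (by omega)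
      constructor
      · rw [h1']; ring
      · rw [h2']
    · simp only [if_neg h1]
      by_cases h2 : n > v
      · simp only [if_pos h2]
        obtain ⟨h1', h2'⟩ := ih maxc (minc + 1) m v (by omega)
        constructor
        · rw [h1']
        · rw [h2']; ring
      · simp only [if_neg h2]
        exact ih maxc minc m n hnm

theorem pvFoldB_eq (t : List Int) : ∀ (rmax rmin : List Int) (m n : Int),
    t.foldl pvStepB (rmax, rmin, some m, some n) =
      (rmax ++ pvScanMax m t, rmin ++ pvScanMin n t,
       some (pvMaxAcc m t), some (pvMinAcc n t)) := by
  induction t with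
  | nil => intro rmax rmin m n; simp [pvScanMax, pvScanMin, pvMaxAcc, pvMinAcc]
  | cons v t ih =>
    intro rmax rmin m n
    simp only [List.foldl_cons, pvStepB, pvScanMax, pvScanMin, pvMaxAcc, pvMinAcc]
    rw [ih]
    simp


theorem pvZipCountMax (t : List Int) : ∀ (m : Int),
    (((m :: pvScanMax m t).zip (pvScanMax m t)).map
      (fun p => if p.2 > p.1 then (1 : Int) else 0)).sum = pvRise m t := by
  induction t with
  | nil => intro m; simp [pvScanMax, pvRise]
  | cons v t ih =>
    intro m
    simp only [pvScanMax, pvRise, List.zip_cons_cons, List.map_cons, List.sum_cons]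
    by_cases h : v > m
    · simp only [if_pos h]
      rw [ih v]
    · simp only [if_neg h]
      rw [ih m]
      simp

theorem pvZipCountMin (t : List Int) : ∀ (n : Int),
    (((n :: pvScanMin n t).zip (pvScanMin n t)).map
      (fun p => if p.2 < p.1 then (1 : Int) else 0)).sum = pvFall n t := by
  induction t with
  | nil => intro n; simp [pvScanMin, pvFall]
  | cons v t ih =>
    intro n
    simp only [pvScanMin, pvFall, List.zip_cons_cons, List.map_cons, List.sum_cons]
    by_cases h : v < n
    · simp only [if_pos h]
      rw [ih v]
    · simp only [if_neg h]
      rw [ih n]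
      simp

-- ===== VERDICT (by name: the statement is the Claim_ definition above) =====
theorem getRecord_spec : Claim_equal_getRecord := by
  intro s _ hpre
  unfold Spec_getRecord
  match s with
  | [] => exact absurd rfl hpre
  | s0 :: t =>
    unfold getRecord getRecord_alt
    simp only []
    -- A side: fold over indices = fold over the tail
    have hA : (PySem.List.pyRange 1 ((s0 :: t).length : Int) 1).foldl
        (fun st i => pvStepA st (PySem.List.pyGetD (s0 :: t) i 0)) (0, 0, s0, s0)
        = t.foldl pvStepA (0, 0, s0, s0) := by
      have := PySem.List.foldl_pyRange_pyGetD' (s0 :: t) 0 pvStepA ((0 : Int), (0 : Int), s0, s0) (a := 1) (by omega)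
      simpa using this
    rw [hA]
    obtain ⟨h1, h2⟩ := pvFoldA_eq t 0 0 s0 s0 le_rfl
    rw [h1, h2]
    -- B side
    have hB : (s0 :: t).foldl pvStepB ([], [], none, none)
        = t.foldl pvStepB ([s0], [s0], some s0, some s0) := by
      simp [List.foldl_cons, pvStepB]
    rw [hB, pvFoldB_eq t [s0] [s0] s0 s0]
    simp only [List.singleton_append]
    rw [PySem.List.slice_from_one, PySem.List.slice_from_one]
    simp only [List.tail_cons]
    rw [pvZipCountMax, pvZipCountMin]
    simp
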